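-- pv_equiv track=rewrite | github.com/JohnPFL/PSET | src/embeddings/embeddings_models.py | _solve_split_with_stemming
-- ===== SOURCE A (Python) =====
-- def _solve_split_with_stemming(sentence, word):
--     sentence_split = sentence.split(word)
--     for i in range(1, len(word)):
--         if len(sentence_split) >= 2:
--             break
--         shortened_word = word[:-i]
--         sentence_split = sentence.split(shortened_word)
--
--     if len(sentence_split) < 2:
--         sentence_split = sentence.split(word)
--
--     return sentence_split
-- ===== SOURCE B (Python) =====
-- def _solve_split_with_stemming(sentence, word):
--     # Binary search the longest prefix of `word` that occurs in `sentence`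
--     # (occurrence of a prefix is monotone in its length), then split once.
--     lo, hi = 0, len(word)
--     while lo < hi:
--         mid = (lo + hi + 1) // 2
--         if word[:mid] in sentence:
--             lo = mid
--         else:
--             hi = mid - 1
--     if lo == 0:
--         return [sentence]
--     return sentence.split(word[:lo])
-- ===== Notes on version B (the rewrite author's own statement) =====
-- stated objective: faster
-- what changed: Instead of linearly re-splitting the sentence on ever-shorter word prefixes, B binary-searches the length of the longest word prefix occurring in the sentence (prefix occurrence is monotone in its length) and performs a single split, returning [sentence] when no prefix occurs; Pre_ excludes only word = '', where A's str.split raises ValueError (empty separator).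
import Mathlib
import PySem

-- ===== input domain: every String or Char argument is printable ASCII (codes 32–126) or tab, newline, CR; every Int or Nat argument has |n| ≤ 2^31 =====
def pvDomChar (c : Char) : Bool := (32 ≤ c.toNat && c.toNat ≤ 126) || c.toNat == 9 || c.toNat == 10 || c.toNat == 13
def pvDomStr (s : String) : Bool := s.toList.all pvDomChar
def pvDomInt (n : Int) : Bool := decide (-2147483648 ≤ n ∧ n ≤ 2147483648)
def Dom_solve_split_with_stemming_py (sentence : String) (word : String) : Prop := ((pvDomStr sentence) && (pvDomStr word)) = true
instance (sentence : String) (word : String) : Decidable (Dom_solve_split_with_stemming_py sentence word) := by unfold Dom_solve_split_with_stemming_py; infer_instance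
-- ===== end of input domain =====

-- B replaces A's linear scan over ever-shorter word prefixes by a binary search for the
-- longest word prefix occurring in the sentence (prefix occurrence is monotone), then one split.


-- ===== PORT A =====
-- the 'for i in range(1, len(word))' loop with its break, carrying sentence_split
def solve_split_with_stemming_py_loop (sentence word : String) : List Int → List String → List String
  | [], ss => ss
  | i :: rest, ss =>
      if 2 ≤ ss.length then ss
      else solve_split_with_stemming_py_loop sentence word rest
             ((PySem.Str.split? sentence (PySem.Str.slice word none (some (-i)))).getD [])

def solve_split_with_stemming_py (sentence : String) (word : String) : List String :=
  let ss0 := (PySem.Str.split? sentence word).getD []   -- sentence.split(word); none (ValueError) only for word = "", outside Pre_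
  let ss := solve_split_with_stemming_py_loop sentence word
              (PySem.List.pyRange 1 (PySem.Str.len word)) ss0
  if ss.length < 2 then (PySem.Str.split? sentence word).getD [] else ss

-- ===== PORT B =====
-- the 'while lo < hi' binary search of Source B
-- fuel only makes the recursion structural; fuel = len(word) ≥ hi - lo always suffices
def solve_split_with_stemming_py_alt_go (sentence word : String) : Nat → Nat → Nat → Nat
  | 0, lo, _ => lo
  | fuel + 1, lo, hi =>
      if lo < hi then
        let mid := (lo + hi + 1) / 2
        if PySem.Str.isIn (PySem.Str.slice word none (some (mid : Int))) sentence
        then solve_split_with_stemming_py_alt_go sentence word fuel mid hi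
        else solve_split_with_stemming_py_alt_go sentence word fuel lo (mid - 1)
      else lo

def solve_split_with_stemming_py_alt (sentence : String) (word : String) : List String :=
  let lo := solve_split_with_stemming_py_alt_go sentence word word.toList.length 0 word.toList.length
  if lo = 0 then [sentence]
  else (PySem.Str.split? sentence (PySem.Str.slice word none (some (lo : Int)))).getD []

-- ===== PRECONDITION & SPEC =====
-- Pre_ excludes only word = "": there str.split raises ValueError (empty separator).
def Pre_solve_split_with_stemming_py (sentence : String) (word : String) : Prop := word ≠ ""
instance (sentence : String) (word : String) : Decidable (Pre_solve_split_with_stemming_py sentence word) := by unfold Pre_solve_split_with_stemming_py; infer_instance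
def pvWitness_solve_split_with_stemming_py : String × String := ("a cab ride", "cabs")

def Spec_solve_split_with_stemming_py (sentence : String) (word : String) (out : List String) : Prop := out = solve_split_with_stemming_py_alt sentence word
instance (sentence : String) (word : String) (out : List String) : Decidable (Spec_solve_split_with_stemming_py sentence word out) := by unfold Spec_solve_split_with_stemming_py; infer_instance

-- ===== CLAIM (what is proved, stated in full; the proofs are below) =====
def Claim_equal_solve_split_with_stemming_py : Prop := ∀ (sentence : String) (word : String), Dom_solve_split_with_stemming_py sentence word → Pre_solve_split_with_stemming_py sentence word → Spec_solve_split_with_stemming_py sentence word (solve_split_with_stemming_py sentence word)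
-- ===== LEMMAS AND PROOFS =====

-- sentence split on the length-k prefix of word, mapped back to String
def pvSplitP (sentence word : String) (k : Nat) : List String :=
  (PySem.Chars.splitOn sentence.toList (word.toList.take k)).map String.ofList

-- length of the longest prefix of word occurring in sentence (0 if none)
def pvKmax (sentence word : String) : Nat :=
  Nat.findGreatest (fun k => word.toList.take k <:+: sentence.toList) word.toList.length

lemma pvOcc_mono {s l : List Char} {j k : Nat} (hjk : j ≤ k) (h : l.take k <:+: s) :
    l.take j <:+: s :=
  ((List.take_prefix_take_left hjk).isInfix).trans h

lemma pvKmax_occ (sentence word : String) :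
    word.toList.take (pvKmax sentence word) <:+: sentence.toList := by
  unfold pvKmax
  exact Nat.findGreatest_spec (P := fun k => word.toList.take k <:+: sentence.toList)
    (Nat.zero_le _) (by simp)

lemma pvGo_not_infix (sep : List Char) :
    ∀ (fuel : Nat) (l cur : List Char) (acc : List (List Char)), l.length < fuel → ¬ sep <:+: l →
      PySem.Chars.splitOn.go sep fuel l cur acc = ((cur.reverse ++ l) :: acc).reverse := by
  intro fuel
  induction fuel with
  | zero => intro l cur acc h; omega
  | succ fuel ih =>
    intro l cur acc h hinf
    match l with
    | [] => simp [PySem.Chars.splitOn.go]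
    | c :: rest =>
      have hpre : sep.isPrefixOf (c :: rest) = false := by
        rw [Bool.eq_false_iff]
        intro hp
        exact hinf (List.IsPrefix.isInfix (List.isPrefixOf_iff_prefix.mp hp))
      have hrest : ¬ sep <:+: rest := fun hr => hinf (hr.trans (List.suffix_cons c rest).isInfix)
      rw [PySem.Chars.splitOn.go, hpre]
      simp only [Bool.false_eq_true, if_false]
      rw [ih rest (c :: cur) acc (by simp at h ⊢; omega) hrest]
      simp

lemma pvSplitOn_not_infix {s sep : List Char} (h : ¬ sep <:+: s) :
    PySem.Chars.splitOn s sep = [s] := by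
  unfold PySem.Chars.splitOn
  rw [pvGo_not_infix sep _ s [] [] (by omega) h]
  simp

lemma pvGo_len_ge (sep : List Char) (hsep : sep ≠ []) :
    ∀ (fuel : Nat) (l cur : List Char) (acc : List (List Char)), l.length < fuel →
      acc.length + 1 ≤ (PySem.Chars.splitOn.go sep fuel l cur acc).length := by
  intro fuel
  induction fuel with
  | zero => intro l cur acc h; omega
  | succ fuel ih =>
    intro l cur acc h
    match l with
    | [] => simp [PySem.Chars.splitOn.go]
    | c :: rest =>
      rw [PySem.Chars.splitOn.go]
      by_cases hpre : sep.isPrefixOf (c :: rest) = true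
      · rw [if_pos hpre]
        have hlen : (List.drop sep.length (c :: rest)).length < fuel := by
          have : 1 ≤ sep.length := by cases sep <;> simp_all
          simp at h ⊢; omega
        have := ih (List.drop sep.length (c :: rest)) [] (cur.reverse :: acc) hlen
        simp at this ⊢; omega
      · rw [if_neg hpre]
        have := ih rest (c :: cur) acc (by simp at h ⊢; omega)
        omega

lemma pvGo_infix_len (sep : List Char) (hsep : sep ≠ []) :
    ∀ (fuel : Nat) (l cur : List Char) (acc : List (List Char)), l.length < fuel → sep <:+: l →
      acc.length + 2 ≤ (PySem.Chars.splitOn.go sep fuel l cur acc).length := by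
  intro fuel
  induction fuel with
  | zero => intro l cur acc h; omega
  | succ fuel ih =>
    intro l cur acc h hinf
    match l with
    | [] => exact absurd (List.eq_nil_of_infix_nil hinf) hsep
    | c :: rest =>
      rw [PySem.Chars.splitOn.go]
      by_cases hpre : sep.isPrefixOf (c :: rest) = true
      · rw [if_pos hpre]
        have hlen : (List.drop sep.length (c :: rest)).length < fuel := by
          have : 1 ≤ sep.length := by cases sep <;> simp_all
          simp at h ⊢; omega
        have := pvGo_len_ge sep hsep fuel (List.drop sep.length (c :: rest)) [] (cur.reverse :: acc) hlen
        simp at this ⊢; omega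
      · rw [if_neg hpre]
        have hrest : sep <:+: rest := by
          rcases List.infix_cons_iff.mp hinf with hp | hi
          · exact absurd (List.isPrefixOf_iff_prefix.mpr hp) hpre
          · exact hi
        exact ih rest (c :: cur) acc (by simp at h ⊢; omega) hrest

lemma pvTwo_le_splitOn {s sep : List Char} (hsep : sep ≠ []) (h : sep <:+: s) :
    2 ≤ (PySem.Chars.splitOn s sep).length := by
  unfold PySem.Chars.splitOn
  have := pvGo_infix_len sep hsep (s.length + 1) s [] [] (by omega) h
  simpa using this

lemma pvSplitGetD (sentence word : String) (sep : String) (k : Nat)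
    (h : sep.toList = word.toList.take k) (hne : word.toList.take k ≠ []) :
    (PySem.Str.split? sentence sep).getD [] = pvSplitP sentence word k := by
  have hk : ¬ (k = 0 ∨ word = "") := by
    rintro (rfl | rfl) <;> simp at hne
  simp [PySem.Str.split?, PySem.Chars.split?, h, pvSplitP, hk]

lemma pvSliceTake (word : String) (k : Nat) :
    (PySem.Str.slice word none (some (k : Int))).toList = word.toList.take k := by
  simp [PySem.Str.toList_slice]

lemma pvSplitP_len_two {sentence word : String} {k : Nat}
    (hne : word.toList.take k ≠ []) (h : word.toList.take k <:+: sentence.toList) :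
    2 ≤ (pvSplitP sentence word k).length := by
  simpa [pvSplitP] using pvTwo_le_splitOn hne h

lemma pvSplitP_not_occ {sentence word : String} {k : Nat}
    (h : ¬ word.toList.take k <:+: sentence.toList) :
    pvSplitP sentence word k = [sentence] := by
  simp [pvSplitP, pvSplitOn_not_infix h, String.ofList_toList]

lemma pvBsearch_eq (sentence word : String) :
    ∀ (fuel lo hi : Nat), hi - lo ≤ fuel → hi ≤ word.toList.length →
      lo ≤ pvKmax sentence word → pvKmax sentence word ≤ hi →
      solve_split_with_stemming_py_alt_go sentence word fuel lo hi = pvKmax sentence word := by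
  intro fuel
  induction fuel with
  | zero =>
    intro lo hi h1 _ h3 h4
    simp [solve_split_with_stemming_py_alt_go]; omega
  | succ fuel ih =>
    intro lo hi h1 h2 h3 h4
    rw [solve_split_with_stemming_py_alt_go]
    by_cases hlt : lo < hi
    · rw [if_pos hlt]
      set mid := (lo + hi + 1) / 2 with hmid
      have hm1 : lo < mid := by omega
      have hm2 : mid ≤ hi := by omega
      by_cases hocc : word.toList.take mid <:+: sentence.toList
      · have hb : PySem.Str.isIn (PySem.Str.slice word none (some (mid : Int))) sentence = true := by
          rw [PySem.Str.isIn_iff_infix, pvSliceTake]; exact hocc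
        simp only [hb, if_true]
        exact ih mid hi (by omega) h2 (Nat.le_findGreatest (by omega) hocc) h4
      · have hb : PySem.Str.isIn (PySem.Str.slice word none (some (mid : Int))) sentence = false := by
          rw [Bool.eq_false_iff, Ne, PySem.Str.isIn_iff_infix, pvSliceTake]; exact hocc
        simp only [hb, Bool.false_eq_true, if_false]
        have hkm : pvKmax sentence word ≤ mid - 1 := by
          by_contra hc
          exact hocc (pvOcc_mono (by omega) (pvKmax_occ sentence word))
        exact ih lo (mid - 1) (by omega) (by omega) h3 hkm
    · rw [if_neg hlt]; omega

lemma pvLe_kmax {sentence word : String} {k : Nat} (hk : k ≤ word.toList.length)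
    (h : word.toList.take k <:+: sentence.toList) : k ≤ pvKmax sentence word := by
  unfold pvKmax
  exact Nat.le_findGreatest hk h

lemma pvKmax_le (sentence word : String) : pvKmax sentence word ≤ word.toList.length :=
  Nat.findGreatest_le _

lemma pvLoopA_spec (sentence word : String) (hw : word.toList ≠ []) :
    ∀ (d i : Nat), word.toList.length - i = d → 1 ≤ i → i ≤ word.toList.length →
      (∀ k, word.toList.length - i + 1 < k → k ≤ word.toList.length →
        ¬ word.toList.take k <:+: sentence.toList) →
      solve_split_with_stemming_py_loop sentence word
          (PySem.List.pyRange (i : Int) (word.toList.length : Int))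
          (pvSplitP sentence word (word.toList.length - i + 1))
        = pvSplitP sentence word (max (pvKmax sentence word) 1) := by
  intro d
  induction d with
  | zero =>
    intro i hd h1 h2 hnone
    have hi : i = word.toList.length := by omega
    subst hi
    have hrange : PySem.List.pyRange (word.toList.length : Int) (word.toList.length : Int) = [] := by
      unfold PySem.List.pyRange; simp
    rw [hrange]
    have hk1 : pvKmax sentence word ≤ 1 := by
      by_contra hc
      exact hnone (pvKmax sentence word) (by omega) (pvKmax_le sentence word)
        (pvKmax_occ sentence word)
    rw [show max (pvKmax sentence word) 1 = 1 from by omega,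
        show word.toList.length - word.toList.length + 1 = 1 from by omega]
    rfl
  | succ d ih =>
    intro i hd h1 h2 hnone
    have hlt : i < word.toList.length := by omega
    rw [PySem.List.pyRange_one_cons (by exact_mod_cast hlt)]
    rw [solve_split_with_stemming_py_loop]
    set n := word.toList.length with hn
    set c := n - i + 1 with hc
    have hc1 : 1 ≤ c := by omega
    have hcn : c ≤ n := by omega
    have hsep : word.toList.take c ≠ [] := by
      intro h
      rcases List.take_eq_nil_iff.mp h with h' | h'
      · omega
      · exact hw h'
    by_cases hocc : word.toList.take c <:+: sentence.toList
    · rw [if_pos (pvSplitP_len_two hsep hocc)]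
      have hck : c ≤ pvKmax sentence word := Nat.le_findGreatest hcn hocc
      have hkc : pvKmax sentence word ≤ c := by
        by_contra hgt
        exact hnone (pvKmax sentence word) (by omega) (pvKmax_le sentence word)
          (pvKmax_occ sentence word)
      have : max (pvKmax sentence word) 1 = c := by omega
      rw [this]
    · have hlen : (pvSplitP sentence word c).length = 1 := by
        rw [pvSplitP_not_occ hocc]; rfl
      rw [if_neg (by omega)]
      have hstep : (PySem.Str.split? sentence
          (PySem.Str.slice word none (some (-(i : Int))))).getD []
          = pvSplitP sentence word (n - (i + 1) + 1) := by
        apply pvSplitGetD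
        · rw [PySem.Str.toList_slice]
          simp only [PySem.Chars.slice_eq_listSlice]
          rw [PySem.List.slice_to_neg_natCast word.toList i (by omega)]
          congr 1
          omega
        · intro h
          rcases List.take_eq_nil_iff.mp h with h' | h'
          · omega
          · exact hw h'
      rw [hstep]
      have hcast : (i : Int) + 1 = ((i + 1 : Nat) : Int) := by push_cast; ring
      rw [hcast]
      apply ih (i + 1) (by omega) (by omega) (by omega)
      intro k hk1 hk2
      by_cases hkc : k = c
      · subst hkc; exact hocc
      · exact hnone k (by omega) hk2

-- ===== VERDICT (by name: the statement is the Claim_ definition above) =====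
theorem solve_split_with_stemming_py_spec : Claim_equal_solve_split_with_stemming_py := by
  intro sentence word _ hpre
  unfold Spec_solve_split_with_stemming_py
  have hw : word.toList ≠ [] := fun h => hpre (by
    apply String.toList_inj.mp; simp [h])
  set n := word.toList.length with hn
  have hn1 : 1 ≤ n := by
    cases h : word.toList with
    | nil => exact absurd h hw
    | cons a l => rw [hn, h]; simp
  -- A's initial split is pvSplitP n
  have h0 : (PySem.Str.split? sentence word).getD [] = pvSplitP sentence word n := by
    apply pvSplitGetD
    · rw [hn, List.take_length]
    · rw [hn, List.take_length]; exact hw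
  -- A's loop result
  have hloop : solve_split_with_stemming_py_loop sentence word
      (PySem.List.pyRange (1 : Int) (n : Int)) (pvSplitP sentence word n)
      = pvSplitP sentence word (max (pvKmax sentence word) 1) := by
    have := pvLoopA_spec sentence word hw (n - 1) 1 rfl (by omega) (by omega)
      (fun k hk1 hk2 => by omega)
    rw [show n - 1 + 1 = n by omega] at this
    exact this
  -- B's binary search finds pvKmax
  have hbs : solve_split_with_stemming_py_alt_go sentence word n 0 n = pvKmax sentence word :=
    pvBsearch_eq sentence word n 0 n (by omega) (le_refl _)
      (Nat.zero_le _) (pvKmax_le sentence word)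
  have hlen : PySem.Str.len word = (n : Int) := by
    simp [PySem.Str.len, hn]
  unfold solve_split_with_stemming_py solve_split_with_stemming_py_alt
  simp only [hlen, h0, hloop, hbs, ← hn]
  by_cases hk0 : pvKmax sentence word = 0
  · rw [hk0]
    have hno1 : ¬ word.toList.take 1 <:+: sentence.toList := by
      intro h
      have := pvLe_kmax (by omega) h
      omega
    have hnon : ¬ word.toList.take n <:+: sentence.toList := by
      intro h
      have := pvLe_kmax (by omega) h
      omega
    simp only [show max 0 1 = 1 from rfl]
    rw [pvSplitP_not_occ hno1, pvSplitP_not_occ hnon]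
    simp
  · have hmax : max (pvKmax sentence word) 1 = pvKmax sentence word := by omega
    rw [hmax, if_neg hk0]
    have hocc := pvKmax_occ sentence word
    have hsep : word.toList.take (pvKmax sentence word) ≠ [] := by
      intro h
      rcases List.take_eq_nil_iff.mp h with h' | h'
      · omega
      · exact hw h'
    rw [if_neg (by have := pvSplitP_len_two hsep hocc; omega)]
    exact (pvSplitGetD sentence word _ _ (pvSliceTake word _) hsep).symm
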